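-- pv_equiv track=rewrite | github.com/korkmaz-arda/google-foobar-2023 | level3/find-the-access-codes/solution.py | solution
-- ===== SOURCE A (Python) =====
-- def solution(l):
--     # Create a dict where keys will map to their respective divisors
--     divisors = {}
--     for i, e in enumerate(l):
--         divisors[(e, i)] = []
--
--     # Find divisors of each number
--     for i, e in enumerate(l):
--         for j, n in enumerate(l[i+1:]):
--             if n % e == 0:
--                 divisors[(n, j+i+1)].append((e, i)) #(value, index)
--
--     # Calculate the number of triplets
--     triplets = 0
--     for num, div_num in divisors.items():
--         for d in div_num:
--             triplets += len(divisors[d])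
--
--     return triplets
-- ===== SOURCE B (Python) =====
-- def solution(l):
--     n = len(l)
--     total = 0
--     # Count triples by their MIDDLE element: for each j, the number of triples
--     # (i, j, k) is (#left divisors of l[j]) * (#right multiples of l[j]).
--     for j in range(n):
--         left = 0
--         for i in range(j):
--             if l[j] % l[i] == 0:
--                 left += 1
--         right = 0
--         for k in range(j + 1, n):
--             if l[k] % l[j] == 0:
--                 right += 1
--         total += left * right
--     return total
-- ===== Notes on version B (the rewrite author's own statement) =====
-- stated objective: simpler
-- what changed: Counts triples by their middle element in one pass (product of left-divisor count and right-multiple count per position) instead of A's staged build of a dict of explicit (value,index) divisor lists followed by a sum of divisor-of-divisor list lengths.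
import Mathlib
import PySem

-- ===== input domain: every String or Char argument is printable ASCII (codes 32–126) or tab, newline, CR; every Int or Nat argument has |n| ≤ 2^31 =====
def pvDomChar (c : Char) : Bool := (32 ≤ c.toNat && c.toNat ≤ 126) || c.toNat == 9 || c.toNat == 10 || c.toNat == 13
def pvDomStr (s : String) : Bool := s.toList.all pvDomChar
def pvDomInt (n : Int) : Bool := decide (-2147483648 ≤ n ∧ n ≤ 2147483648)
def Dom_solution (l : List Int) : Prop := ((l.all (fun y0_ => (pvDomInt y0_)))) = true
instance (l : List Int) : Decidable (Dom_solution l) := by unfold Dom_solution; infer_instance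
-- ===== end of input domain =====

-- B counts triples by their middle element (left-divisor count times right-multiple count, one
-- pass, O(1) extra space) instead of A's dict of explicit (value,index) divisor lists summed
-- over divisor-of-divisor list lengths; return value only, neither mutates its argument.


-- ===== PORT A =====
-- divisors = {}; for i, e in enumerate(l): divisors[(e, i)] = []
def solution_divisors0 (l : List Int) : PySem.Dict (Int × Int) (List (Int × Int)) :=
  (PySem.List.enumerate l).foldl (fun d p => d.insert (p.2, p.1) []) PySem.Dict.empty

-- for i, e in enumerate(l): for j, n in enumerate(l[i+1:]): if n % e == 0: divisors[(n, j+i+1)].append((e, i))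
-- (the key (n, j+i+1) is always present, so Python's d[k].append is Dict.modify with default [])
def solution_divisors (l : List Int) : PySem.Dict (Int × Int) (List (Int × Int)) :=
  (PySem.List.enumerate l).foldl (fun d p =>
    (PySem.List.enumerate (PySem.List.slice l (some (p.1 + 1)) none)).foldl (fun d q =>
      if PySem.Int.mod q.2 p.2 == 0 then
        d.modify (q.2, q.1 + p.1 + 1) [] (fun v => v ++ [(p.2, p.1)])
      else d) d)
    (solution_divisors0 l)

-- triplets = 0; for num, div_num in divisors.items(): for d in div_num: triplets += len(divisors[d])
-- (every d stored is itself a key, so Python's divisors[d] is Dict.getD with default [])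
def solution (l : List Int) : Int :=
  let divisors := solution_divisors l
  divisors.items.foldl (fun t kv =>
    kv.2.foldl (fun t dp => t + ((divisors.getD dp []).length : Int)) t) 0

-- ===== PORT B =====
-- for each j: left = #{i < j : l[j] % l[i] == 0}, right = #{k > j : l[k] % l[j] == 0};
-- total += left * right
def solution_alt (l : List Int) : Int :=
  let n : Int := l.length
  (PySem.List.pyRange 0 n 1).foldl (fun total j =>
    let left : Int := (PySem.List.pyRange 0 j 1).foldl (fun c i =>
      if PySem.Int.mod (PySem.List.pyGetD l j 0) (PySem.List.pyGetD l i 0) == 0 then c + 1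
      else c) 0
    let right : Int := (PySem.List.pyRange (j + 1) n 1).foldl (fun c k =>
      if PySem.Int.mod (PySem.List.pyGetD l k 0) (PySem.List.pyGetD l j 0) == 0 then c + 1
      else c) 0
    total + left * right) 0

-- ===== PRECONDITION & SPEC =====
-- Pre_ excludes exactly the inputs on which Python A raises ZeroDivisionError: a zero element
-- before the last position makes 'n % e' divide by zero (B raises there too).
def Pre_solution (l : List Int) : Prop := ∀ x ∈ l.dropLast, x ≠ 0
instance (l : List Int) : Decidable (Pre_solution l) := by unfold Pre_solution; infer_instance
def pvWitness_solution : List Int := [1, 2, 4]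

def Spec_solution (l : List Int) (out : Int) : Prop := out = solution_alt l
instance (l : List Int) (out : Int) : Decidable (Spec_solution l out) := by unfold Spec_solution; infer_instance

-- ===== CLAIM (what is proved, stated in full; the proofs are below) =====
def Claim_equal_solution : Prop := ∀ (l : List Int), Dom_solution l → Pre_solution l → Spec_solution l (solution l)


-- ===== LEMMAS AND PROOFS =====

-- proof-side helpers
def pvP (l : List Int) (t i : Int) : Bool :=
  PySem.Int.mod (PySem.List.pyGetD l t 0) (PySem.List.pyGetD l i 0) == 0

def pvC (l : List Int) (t : Int) : Int :=
  (((PySem.List.pyRange 0 t 1).countP (pvP l t) : Nat) : Int)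

def pvV (l : List Int) (i : Int) : Int := PySem.List.pyGetD l i 0

def pvDiv (l : List Int) (t : Int) : List (Int × Int) :=
  ((PySem.List.pyRange 0 t 1).filter (pvP l t)).map (fun i => (pvV l i, i))

def pvTotal (l : List Int) : Int :=
  ((PySem.List.pyRange 0 (l.length : Int) 1).map (fun t =>
    (((PySem.List.pyRange 0 t 1).filter (pvP l t)).map (pvC l)).sum)).sum

-- right-multiple count of position j (B's inner 'right' loop as a countP)
def pvRt (l : List Int) (j : Int) : Int :=
  (((PySem.List.pyRange (j + 1) (l.length : Int) 1).countP (fun t => pvP l t j) : Nat) : Int)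

lemma pv_alt_eq (l : List Int) :
    solution_alt l =
      ((PySem.List.pyRange 0 (l.length : Int) 1).map (fun j => pvC l j * pvRt l j)).sum := by
  simp only [solution_alt]
  rw [PySem.List.foldl_congr_mem _ _ (fun total j => total + pvC l j * pvRt l j) _ ?_]
  · rw [PySem.List.foldl_add]; simp
  · intro acc j _
    rw [PySem.List.foldl_if_add_one
        (fun i => PySem.Int.mod (PySem.List.pyGetD l j 0) (PySem.List.pyGetD l i 0) == 0),
      PySem.List.foldl_if_add_one
        (fun k => PySem.Int.mod (PySem.List.pyGetD l k 0) (PySem.List.pyGetD l j 0) == 0)]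
    simp only [zero_add, pvC, pvRt]
    rfl

-- list-sum over List.range = Finset.range sum
lemma pv_sum_range (m : Nat) (f : Nat → Int) :
    ((List.range m).map f).sum = ∑ i ∈ Finset.range m, f i := by
  induction m with
  | zero => simp
  | succ k ih => rw [List.range_succ, Finset.sum_range_succ, List.map_append]; simp [ih]

-- sum over a filtered list as a sum of an if-then-else
lemma pv_sum_filter {α : Type} (q : α → Bool) (h : α → Int) (xs : List α) :
    ((xs.filter q).map h).sum = (xs.map (fun x => if q x then h x else 0)).sum := by
  induction xs with
  | nil => rfl
  | cons x xs ih => by_cases hq : q x = true <;> simp [hq, ih]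

-- extend a range-t sum to a range-n sum (t ≤ n) guarded by i < t
lemma pv_sum_extend (t n : Nat) (h : t ≤ n) (g : Nat → Int) :
    ∑ i ∈ Finset.range t, g i = ∑ i ∈ Finset.range n, if i < t then g i else 0 := by
  rw [Finset.sum_ite, Finset.sum_const_zero, add_zero]
  congr 1
  ext x
  simp only [Finset.mem_range, Finset.mem_filter]
  omega

-- B's right count over the suffix range, re-read as a guarded count over the full range
lemma pv_rt_eq (l : List Int) (j : Nat) (hj : j < l.length) :
    pvRt l (j : Int) =
      ∑ t ∈ Finset.range l.length,
        if j < t ∧ pvP l (t : Int) (j : Int) = true then (1 : Int) else 0 := by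
  have hsplit : PySem.List.pyRange 0 (l.length : Int) 1 =
      PySem.List.pyRange 0 ((j : Int) + 1) 1 ++
        PySem.List.pyRange ((j : Int) + 1) (l.length : Int) 1 :=
    PySem.List.pyRange_one_append 0 _ _ (by omega) (by omega)
  have hq : (PySem.List.pyRange 0 (l.length : Int) 1).countP
      (fun t => decide ((j : Int) < t) && pvP l t (j : Int)) =
      (PySem.List.pyRange ((j : Int) + 1) (l.length : Int) 1).countP
        (fun t => pvP l t (j : Int)) := by
    rw [hsplit, List.countP_append]
    have h1 : (PySem.List.pyRange 0 ((j : Int) + 1) 1).countP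
        (fun t => decide ((j : Int) < t) && pvP l t (j : Int)) = 0 := by
      rw [List.countP_eq_zero]
      intro t ht
      have hb := PySem.List.mem_pyRange_one.mp ht
      simp [show ¬ (j : Int) < t by omega]
    have h2 : (PySem.List.pyRange ((j : Int) + 1) (l.length : Int) 1).countP
        (fun t => decide ((j : Int) < t) && pvP l t (j : Int)) =
        (PySem.List.pyRange ((j : Int) + 1) (l.length : Int) 1).countP
          (fun t => pvP l t (j : Int)) := by
      apply List.countP_congr
      intro t ht
      have hb := PySem.List.mem_pyRange_one.mp ht
      simp [show (j : Int) < t by omega]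
    rw [h1, h2, Nat.zero_add]
  rw [pvRt, ← hq, PySem.List.pyRange_zero_natCast, List.countP_map]
  simp only [Function.comp_def]
  rw [← PySem.List.sum_map_ite_one_zero (fun k : Nat =>
        (decide ((j : Int) < (k : Int)) && pvP l (k : Int) (j : Int))) (List.range l.length),
    pv_sum_range]
  refine Finset.sum_congr rfl (fun t _ => ?_)
  by_cases hlt : j < t
  · simp [hlt, show (j : Int) < (t : Int) by omega]
  · simp [hlt, show ¬ (j : Int) < (t : Int) by omega]

-- A's per-target divisor-count sum, re-read as a guarded Finset sum
lemma pv_inner_eq (l : List Int) (t : Nat) (ht : t < l.length) :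
    (((PySem.List.pyRange 0 (t : Int) 1).filter (pvP l (t : Int))).map (pvC l)).sum =
      ∑ i ∈ Finset.range l.length,
        if i < t ∧ pvP l (t : Int) (i : Int) = true then pvC l (i : Int) else 0 := by
  rw [PySem.List.pyRange_zero_natCast, List.filter_map, List.map_map,
    pv_sum_filter]
  simp only [Function.comp_def]
  rw [pv_sum_range, pv_sum_extend t l.length (le_of_lt ht)]
  refine Finset.sum_congr rfl (fun i _ => ?_)
  by_cases hlt : i < t
  · simp only [hlt, if_true, true_and]
  · simp [hlt]

-- the Fubini step: A's double sum equals B's product sum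
lemma pv_total_eq_alt (l : List Int) : pvTotal l = solution_alt l := by
  rw [pv_alt_eq, pvTotal, PySem.List.pyRange_zero_natCast, List.map_map, List.map_map,
    pv_sum_range, pv_sum_range]
  calc
    ∑ t ∈ Finset.range l.length,
        (((PySem.List.pyRange 0 (t : Int) 1).filter (pvP l (t : Int))).map (pvC l)).sum
      = ∑ t ∈ Finset.range l.length, ∑ i ∈ Finset.range l.length,
          if i < t ∧ pvP l (t : Int) (i : Int) = true then pvC l (i : Int) else 0 := by
        exact Finset.sum_congr rfl (fun t htm =>
          pv_inner_eq l t (Finset.mem_range.mp htm))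
    _ = ∑ i ∈ Finset.range l.length, ∑ t ∈ Finset.range l.length,
          if i < t ∧ pvP l (t : Int) (i : Int) = true then pvC l (i : Int) else 0 :=
        Finset.sum_comm
    _ = ∑ j ∈ Finset.range l.length, pvC l (j : Int) * pvRt l (j : Int) := by
        refine Finset.sum_congr rfl (fun j hjm => ?_)
        rw [pv_rt_eq l j (Finset.mem_range.mp hjm), Finset.mul_sum]
        refine Finset.sum_congr rfl (fun t _ => ?_)
        rw [mul_ite, mul_one, mul_zero]

-- ---- A-side helpers (proof only) ----

def pvR (l : List Int) : List Int := PySem.List.pyRange 0 (l.length : Int) 1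

def pvG (l : List Int) (p : Int × Int) : List ((Int × Int) × (Int × Int)) :=
  ((PySem.List.enumerate (PySem.List.slice l (some (p.1 + 1)) none)).filter
    (fun q => PySem.Int.mod q.2 p.2 == 0)).map (fun q => ((q.2, q.1 + p.1 + 1), (p.2, p.1)))

def pvD0 (l : List Int) : PySem.Dict (Int × Int) (List (Int × Int)) :=
  solution_divisors0 l

def pvDF (l : List Int) : PySem.Dict (Int × Int) (List (Int × Int)) :=
  ((PySem.List.enumerate l).flatMap (pvG l)).foldl
    (fun d kv => d.modify kv.1 [] (fun v => v ++ [kv.2])) (pvD0 l)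

lemma pv_en (l : List Int) :
    PySem.List.enumerate l = (pvR l).map (fun j => (j, pvV l j)) := by
  have h := PySem.List.enumerate_eq_map_pyRange l 0
  simpa [pvR, pvV] using h

lemma pv_set_update_subset (xs s : List (Int × Int)) (h : ∀ x ∈ xs, x ∈ s) :
    PySem.Set.update s xs = s := by
  induction xs generalizing s with
  | nil => rfl
  | cons x xs ih =>
    have hx : x ∈ s := h x (List.mem_cons_self)
    have : PySem.Set.add s x = s := by simp [PySem.Set.add, PySem.Set.contains, hx]
    simp only [PySem.Set.update, List.foldl_cons, this] at *
    exact ih s (fun y hy => h y (List.mem_cons_of_mem _ hy))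

lemma pv_filter_point {α : Type} [DecidableEq α] (l : List α) (f : α → Bool) (c : α)
    (hnd : l.Nodup) (himp : ∀ x, f x = true → x = c) :
    l.filter f = if c ∈ l ∧ f c = true then [c] else [] := by
  induction l with
  | nil => simp
  | cons x xs ih =>
    have hnd' := hnd.of_cons
    by_cases hfx : f x = true
    · have hxc : x = c := himp x hfx
      subst hxc
      have hxn : x ∉ xs := (List.nodup_cons.mp hnd).1
      have : xs.filter f = [] := by
        rw [List.filter_eq_nil_iff]
        intro y hy hfy
        exact hxn ((himp y hfy) ▸ hy)
      simp [hfx, this]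
    · have hxc : x ≠ c ∨ f c = false := by
        by_cases hx : x = c
        · right; rw [← hx]; simpa using hfx
        · left; exact hx
      rw [List.filter_cons, if_neg (by simpa using hfx), ih hnd']
      rcases hxc with hne | hfc
      · simp only [List.mem_cons]
        congr 1
        simp only [eq_iff_iff, and_congr_left_iff]
        intro _
        constructor
        · exact Or.inr
        · rintro (h' | h')
          · exact absurd h'.symm hne
          · exact h'
      · simp [hfc]

lemma pv_flatMap_if {α β : Type} (l : List α) (c : α → Bool) (h : α → β) :
    l.flatMap (fun x => if c x then [h x] else []) = (l.filter c).map h := by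
  induction l with
  | nil => rfl
  | cons x xs ih =>
    by_cases hc : c x = true <;> simp [List.flatMap_cons, hc, ih]

lemma pv_pyGetD_drop (l : List Int) (m : Nat) {j : Int} (hj : 0 ≤ j) :
    PySem.List.pyGetD (l.drop m) j 0 = pvV l ((m : Int) + j) := by
  rw [pvV, PySem.List.pyGetD_of_nonneg _ _ hj, PySem.List.pyGetD_of_nonneg _ _ (by omega)]
  rw [List.getD_eq_getElem?_getD, List.getD_eq_getElem?_getD, List.getElem?_drop]
  have hidx : m + j.toNat = ((m : Int) + j).toNat := by omega
  rw [hidx]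

lemma pv_keys0_nodup (l : List Int) : ((pvR l).map (fun j => (pvV l j, j))).Nodup := by
  exact (PySem.List.nodup_pyRange_one 0 _).map
    (fun a b hab => by simpa using congrArg Prod.snd hab)

lemma pv_d0_items (l : List Int) :
    (pvD0 l).items = (pvR l).map (fun j => ((pvV l j, j), ([] : List (Int × Int)))) := by
  unfold pvD0 solution_divisors0
  rw [pv_en, List.foldl_map]
  rw [PySem.Dict.items_foldl_insert_fresh (pvR l) (fun j => (pvV l j, j))
      (fun _ => ([] : List (Int × Int))) PySem.Dict.empty
      (fun a _ => PySem.Dict.contains_empty _) (pv_keys0_nodup l)]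
  rfl

lemma pv_d0_keys (l : List Int) : (pvD0 l).keys = (pvR l).map (fun j => (pvV l j, j)) := by
  simp only [PySem.Dict.keys, pv_d0_items, List.map_map]
  rfl

lemma pv_d0_getD (l : List Int) (c : Int × Int) (hc : c ∈ (pvD0 l).keys) :
    (pvD0 l).getD c [] = [] := by
  have hnd : (pvD0 l).keys.Nodup := by rw [pv_d0_keys]; exact pv_keys0_nodup l
  rw [pv_d0_keys] at hc
  obtain ⟨j, hj, hcj⟩ := List.mem_map.mp hc
  have hmem : (c, ([] : List (Int × Int))) ∈ (pvD0 l).items := by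
    rw [pv_d0_items]
    exact List.mem_map.mpr ⟨j, hj, by rw [hcj]⟩
  exact PySem.Dict.getD_of_mem_items _ hmem hnd []

lemma pv_g_filter (l : List Int) {i t : Int} (hi : 0 ≤ i) (_ht0 : 0 ≤ t)
    (ht : t < (l.length : Int)) :
    (pvG l (i, pvV l i)).filter (fun kv => kv.1 == (pvV l t, t)) =
      if (decide (i < t) && pvP l t i) = true then [((pvV l t, t), (pvV l i, i))] else [] := by
  have hm : ((i + 1).toNat : Int) = i + 1 := by omega
  unfold pvG
  rw [PySem.List.slice_from l (by omega : (0:Int) ≤ i + 1)]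
  rw [PySem.List.enumerate_eq_map_pyRange (l.drop (i + 1).toNat) 0]
  simp only [List.filter_map, List.filter_filter, List.map_map, Function.comp]
  have him : ∀ x : Int,
      (((PySem.List.pyGetD (List.drop (i + 1).toNat l) x 0, x + i + 1) == (pvV l t, t)) &&
        (PySem.Int.mod (PySem.List.pyGetD (List.drop (i + 1).toNat l) x 0) (pvV l i) == 0)) = true →
      x = t - i - 1 := by
    intro x hx
    simp only [Bool.and_eq_true, beq_iff_eq, Prod.mk.injEq] at hx
    omega
  rw [pv_filter_point _ _ (t - i - 1) (PySem.List.nodup_pyRange_one _ _) him]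
  have harith : t - i - 1 + i + 1 = t := by omega
  have hit_of_mem : t - i - 1 ∈ PySem.List.pyRange 0 (PySem.List.len (List.drop (i + 1).toNat l)) →
      i < t := by
    intro hm'
    rw [PySem.List.mem_pyRange_one] at hm'
    omega
  have hdrop' : i < t → PySem.List.pyGetD (List.drop (i + 1).toNat l) (t - i - 1) 0 = pvV l t := by
    intro _h
    rw [pv_pyGetD_drop l (i + 1).toNat (by omega : (0:Int) ≤ t - i - 1)]
    congr 1
    omega
  split_ifs with h1 h2 h3
  · simp [hdrop' (hit_of_mem h1.1), harith]
  · exfalso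
    have hit := hit_of_mem h1.1
    have hf := h1.2
    rw [hdrop' hit] at hf
    simp only [Bool.and_eq_true, beq_iff_eq] at hf
    simp only [Bool.and_eq_true, decide_eq_true_eq] at h2
    exact h2 ⟨hit, by simpa [pvP, pvV] using hf.2⟩
  · exfalso
    simp only [Bool.and_eq_true, decide_eq_true_eq] at h3
    obtain ⟨hit, hp⟩ := h3
    refine h1 ⟨?_, ?_⟩
    · rw [PySem.List.mem_pyRange_one]
      simp only [PySem.List.len_eq, List.length_drop]
      omega
    · rw [hdrop' hit, harith]
      simp only [Bool.and_eq_true, beq_iff_eq]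
      exact ⟨trivial, by simpa [pvP, pvV] using hp⟩
  · rfl

lemma pv_flat_filter (l : List Int) {t : Int} (ht0 : 0 ≤ t) (ht : t < (l.length : Int)) :
    ((PySem.List.enumerate l).flatMap (pvG l)).filter (fun kv => kv.1 == (pvV l t, t)) =
      ((PySem.List.pyRange 0 t 1).filter (pvP l t)).map
        (fun i => ((pvV l t, t), (pvV l i, i))) := by
  rw [pv_en, List.flatMap_map, List.filter_flatMap]
  have hcg : ∀ j ∈ pvR l,
      List.filter (fun kv => kv.1 == (pvV l t, t)) (pvG l (j, pvV l j)) =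
      (if (decide (j < t) && pvP l t j) = true then [((pvV l t, t), (pvV l j, j))] else []) := by
    intro j hj
    have hb := PySem.List.mem_pyRange_one.mp (by simpa [pvR] using hj)
    exact pv_g_filter l hb.1 ht0 ht
  rw [List.flatMap_congr hcg]
  rw [pv_flatMap_if (pvR l) (fun j => decide (j < t) && pvP l t j)
      (fun j => ((pvV l t, t), (pvV l j, j)))]
  have hsplit : pvR l = PySem.List.pyRange 0 t 1 ++ PySem.List.pyRange t (l.length : Int) 1 :=
    PySem.List.pyRange_one_append 0 t (l.length : Int) ht0 (le_of_lt ht)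
  rw [hsplit, List.filter_append]
  have h2 : (PySem.List.pyRange t (l.length : Int) 1).filter
      (fun j => decide (j < t) && pvP l t j) = [] := by
    rw [List.filter_eq_nil_iff]
    intro j hj
    have hb := PySem.List.mem_pyRange_one.mp hj
    simp [show ¬ j < t by omega]
  have h3 : ∀ j ∈ PySem.List.pyRange 0 t 1,
      (decide (j < t) && pvP l t j) = pvP l t j := by
    intro j hj
    have hb := PySem.List.mem_pyRange_one.mp hj
    simp [show j < t from hb.2]
  rw [h2, List.append_nil, List.filter_congr h3]

lemma pv_flat_keys_mem (l : List Int) (x : (Int × Int) × (Int × Int))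
    (hx : x ∈ (PySem.List.enumerate l).flatMap (pvG l)) :
    x.1 ∈ (pvR l).map (fun j => (pvV l j, j)) := by
  rw [pv_en, List.flatMap_map] at hx
  obtain ⟨j, hj, hxg⟩ := List.mem_flatMap.mp hx
  have hjb := PySem.List.mem_pyRange_one.mp (by simpa [pvR] using hj)
  rw [pvG, PySem.List.slice_from l (by omega : (0:Int) ≤ j + 1)] at hxg
  obtain ⟨q, hq, hxq⟩ := List.mem_map.mp hxg
  have hq' := List.mem_of_mem_filter hq
  obtain ⟨k, hk, hqk⟩ := (PySem.List.mem_enumerate_iff _ _ _).mp hq'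
  have hmn : ((j + 1).toNat : Int) = j + 1 := by omega
  have hlen : (List.drop (j + 1).toNat l).length = l.length - (j + 1).toNat := List.length_drop
  refine List.mem_map.mpr ⟨(k : Int) + j + 1, ?_, ?_⟩
  · rw [pvR, PySem.List.mem_pyRange_one]
    constructor
    · omega
    · have : k < l.length - (j + 1).toNat := by rw [← hlen]; exact hk
      omega
  · subst hxq
    subst hqk
    simp only [zero_add]
    congr 1
    · rw [pvV, PySem.List.pyGetD_eq_getElem l 0 (by omega) (by
        have : k < l.length - (j + 1).toNat := by rw [← hlen]; exact hk
        omega)]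
      rw [List.getElem_drop]
      congr 1
      omega

lemma pv_dF_keys (l : List Int) : (pvDF l).keys = (pvR l).map (fun j => (pvV l j, j)) := by
  rw [show (pvDF l).keys = PySem.Set.update (pvD0 l).keys
        (((PySem.List.enumerate l).flatMap (pvG l)).map (fun kv => kv.1)) from
      PySem.Dict.keys_foldl_modify_key ((PySem.List.enumerate l).flatMap (pvG l))
        (fun kv : (Int × Int) × (Int × Int) => kv.1) ([] : List (Int × Int))
        (fun (_ : PySem.Dict (Int × Int) (List (Int × Int)))
             (kv : (Int × Int) × (Int × Int)) (v : List (Int × Int)) => v ++ [kv.2])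
        (pvD0 l)]
  rw [pv_d0_keys]
  exact pv_set_update_subset _ _ (fun x hxm => by
    obtain ⟨y, hy, hxy⟩ := List.mem_map.mp hxm
    exact hxy ▸ pv_flat_keys_mem l y hy)

lemma pv_dF_getD (l : List Int) {t : Int} (ht0 : 0 ≤ t) (ht : t < (l.length : Int)) :
    (pvDF l).getD (pvV l t, t) [] = pvDiv l t := by
  unfold pvDF
  rw [PySem.Dict.getD_foldl_modify_append]
  rw [pv_flat_filter l ht0 ht]
  rw [pv_d0_getD l _ (by
    rw [pv_d0_keys]
    exact List.mem_map.mpr ⟨t, by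
      rw [pvR, PySem.List.mem_pyRange_one]; exact ⟨ht0, ht⟩, rfl⟩)]
  rw [List.nil_append, List.map_map]
  rfl

lemma pv_div_length (l : List Int) (t : Int) : ((pvDiv l t).length : Int) = pvC l t := by
  simp [pvDiv, pvC, List.countP_eq_length_filter]

lemma pv_divisors_eq (l : List Int) : solution_divisors l = pvDF l := by
  unfold solution_divisors pvDF pvD0
  rw [List.foldl_flatMap]
  refine PySem.List.foldl_congr_mem _ _ _ _ (fun d p _ => ?_)
  rw [PySem.List.foldl_if_eq_foldl_filter]
  rw [pvG, List.foldl_map]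

lemma pv_a_eq (l : List Int) : solution l = pvTotal l := by
  simp only [solution, pv_divisors_eq]
  have hnd : (pvDF l).keys.Nodup := by rw [pv_dF_keys]; exact pv_keys0_nodup l
  rw [PySem.Dict.items_eq_map_keys _ hnd [], pv_dF_keys, List.map_map, List.foldl_map]
  rw [PySem.List.foldl_congr_mem _ _
      (fun acc t => acc + (((PySem.List.pyRange 0 t 1).filter (pvP l t)).map (pvC l)).sum) _ ?_]
  · rw [pvR, PySem.List.foldl_add]
    simp [pvTotal]
  · intro acc t htm
    have hb := PySem.List.mem_pyRange_one.mp (by simpa [pvR] using htm)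
    show ((pvDF l).getD (pvV l t, t) []).foldl
        (fun a dp => a + (((pvDF l).getD dp []).length : Int)) acc = _
    rw [pv_dF_getD l hb.1 hb.2, pvDiv, List.foldl_map]
    rw [PySem.List.foldl_congr_mem _ _ (fun a i => a + pvC l i) _ ?_]
    · rw [PySem.List.foldl_add]
    · intro a i him
      have hib := PySem.List.mem_pyRange_one.mp (List.mem_of_mem_filter him)
      show a + (((pvDF l).getD (pvV l i, i) []).length : Int) = a + pvC l i
      rw [pv_dF_getD l hib.1 (by omega : i < (l.length : Int)), pv_div_length]

-- ===== VERDICT (by name: the statement is the Claim_ definition above) =====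
theorem solution_spec : Claim_equal_solution := by
  intro l _ _
  unfold Spec_solution
  rw [pv_a_eq, pv_total_eq_alt]
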